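-- pv_equiv track=rewrite | github.com/scottmm374/My_Advent_solutions | Advent/2022/Day11MonkeyintheMiddle/main.py | check_monkey_four
-- ===== SOURCE A (Python) =====
-- def check_monkey_four(arr_0, arr_1, arr_2, count):
--
--     temp_4 = arr_0
--     temp_2 = arr_1
--     temp_6 = arr_2
--     m_four = count
--
--     while len(temp_4) > 0:
--         m_four +=1
--         item = temp_4.pop(0)
--         new = item * 17
--         # rounded = math.floor(new / 3)
--         if new % 19 == 0:
--             temp_2.append(new)
--         else:
--             temp_6.append(new)
--     return(temp_4, temp_2, temp_6, m_four)
-- ===== SOURCE B (Python) =====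
-- def check_monkey_four(arr_0, arr_1, arr_2, count):
--     new_items = [x * 17 for x in arr_0]
--     arr_1.extend(n for n in new_items if n % 19 == 0)
--     arr_2.extend(n for n in new_items if n % 19 != 0)
--     count += len(arr_0)
--     arr_0.clear()
--     return (arr_0, arr_1, arr_2, count)
-- ===== Notes on version B (the rewrite author's own statement) =====
-- stated objective: faster
-- what changed: Replaces the interleaved pop(0)-and-route while loop (pop(0) shifts the whole list each iteration) with a compute-then-partition decomposition: scale the whole list once, append the two divisibility classes with two filtered passes, add len(arr_0) to count, and clear arr_0.
import Mathlib
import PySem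

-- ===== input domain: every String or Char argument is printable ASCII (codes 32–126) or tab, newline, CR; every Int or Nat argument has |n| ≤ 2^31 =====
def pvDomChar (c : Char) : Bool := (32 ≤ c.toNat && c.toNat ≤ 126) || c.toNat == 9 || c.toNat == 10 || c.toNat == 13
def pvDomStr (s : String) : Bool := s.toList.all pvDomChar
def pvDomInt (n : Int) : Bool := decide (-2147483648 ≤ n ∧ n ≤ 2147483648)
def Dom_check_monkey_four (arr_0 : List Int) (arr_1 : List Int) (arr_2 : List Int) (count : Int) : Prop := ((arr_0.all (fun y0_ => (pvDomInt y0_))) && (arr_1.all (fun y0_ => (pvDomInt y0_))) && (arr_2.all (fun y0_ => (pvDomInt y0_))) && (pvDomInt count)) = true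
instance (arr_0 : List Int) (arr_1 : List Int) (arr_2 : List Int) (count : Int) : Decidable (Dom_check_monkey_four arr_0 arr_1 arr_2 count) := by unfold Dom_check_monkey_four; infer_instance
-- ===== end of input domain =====

-- ===== PORT A =====
-- A's while loop: pop the head, scale by 17, route by divisibility by 19, bump the counter.
def cmfLoop : List Int → List Int → List Int → Int → List Int × List Int × List Int × Int
  | [], temp_2, temp_6, m_four => ([], temp_2, temp_6, m_four)
  | item :: rest, temp_2, temp_6, m_four =>
    let new := item * 17
    if PySem.Int.mod new 19 = 0 then
      cmfLoop rest (temp_2 ++ [new]) temp_6 (m_four + 1)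
    else
      cmfLoop rest temp_2 (temp_6 ++ [new]) (m_four + 1)

def check_monkey_four (arr_0 : List Int) (arr_1 : List Int) (arr_2 : List Int) (count : Int) : List Int × List Int × List Int × Int :=
  cmfLoop arr_0 arr_1 arr_2 count

-- ===== PORT B =====
-- B: scale everything first, then partition with two filtered passes; count += len(arr_0); arr_0 cleared.
def check_monkey_four_alt (arr_0 : List Int) (arr_1 : List Int) (arr_2 : List Int) (count : Int) : List Int × List Int × List Int × Int :=
  let new_items := arr_0.map (fun x => x * 17)
  ([], arr_1 ++ new_items.filter (fun n => PySem.Int.mod n 19 = 0),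
       arr_2 ++ new_items.filter (fun n => PySem.Int.mod n 19 ≠ 0),
       count + arr_0.length)

-- ===== PRECONDITION & SPEC =====
def Spec_check_monkey_four (arr_0 : List Int) (arr_1 : List Int) (arr_2 : List Int) (count : Int) (out : List Int × List Int × List Int × Int) : Prop := out = check_monkey_four_alt arr_0 arr_1 arr_2 count
instance (arr_0 : List Int) (arr_1 : List Int) (arr_2 : List Int) (count : Int) (out : List Int × List Int × List Int × Int) : Decidable (Spec_check_monkey_four arr_0 arr_1 arr_2 count out) := by unfold Spec_check_monkey_four; infer_instance

-- ===== CLAIM (what is proved, stated in full; the proofs are below) =====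
def Claim_equal_check_monkey_four : Prop := ∀ (arr_0 : List Int) (arr_1 : List Int) (arr_2 : List Int) (count : Int), Dom_check_monkey_four arr_0 arr_1 arr_2 count → Spec_check_monkey_four arr_0 arr_1 arr_2 count (check_monkey_four arr_0 arr_1 arr_2 count)

-- ===== LEMMAS AND PROOFS =====

lemma cmfLoop_eq_alt (arr_0 arr_1 arr_2 : List Int) (count : Int) :
    cmfLoop arr_0 arr_1 arr_2 count = check_monkey_four_alt arr_0 arr_1 arr_2 count := by
  induction arr_0 generalizing arr_1 arr_2 count with
  | nil => simp [cmfLoop, check_monkey_four_alt]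
  | cons x xs ih =>
    simp only [cmfLoop]
    split_ifs with h
    · rw [ih]
      simp only [check_monkey_four_alt, List.map_cons, List.filter_cons, h, decide_true,
        if_true, ne_eq, not_true_eq_false, decide_false, if_false, List.append_assoc,
        List.cons_append, List.length_cons, Prod.mk.injEq, List.nil_append]
      and_intros <;> first | trivial | omega
    · rw [ih]
      simp only [check_monkey_four_alt, List.map_cons, List.filter_cons, h, decide_false,
        if_false, ne_eq, not_false_eq_true, decide_true, if_true, List.append_assoc,
        List.cons_append, List.length_cons, Prod.mk.injEq, List.nil_append]
      and_intros <;> first | trivial | omega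

-- ===== VERDICT (by name: the statement is the Claim_ definition above) =====
theorem check_monkey_four_spec : Claim_equal_check_monkey_four := by
  intro a0 a1 a2 c _
  show check_monkey_four a0 a1 a2 c = check_monkey_four_alt a0 a1 a2 c
  exact cmfLoop_eq_alt a0 a1 a2 c
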